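-- pv_equiv track=rewrite | github.com/rorySomething/python-shorties | menace.py | boardToInt
-- ===== SOURCE A (Python) =====
-- def boardToInt(board):
--     """board is array of X or O"""
--     n = 0
--     for p in board[::-1]: # Loop backwards
--         if p == '':
--             n <<= 2 # 2   0's
--             continue
--         n |= 1
--         n <<= 1
--         if p == 'X':
--             n |= 1
--         n <<= 1
--     n >>= 1
--     return n
-- ===== SOURCE B (Python) =====
-- def boardToInt(board):
--     """board is array of X or O"""
--     n = 0
--     for i, p in enumerate(board):
--         if p == '':
--             continue
--         n |= (0b11 if p == 'X' else 0b10) << (2 * i)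
--     return n
-- ===== Notes on version B (the rewrite author's own statement) =====
-- stated objective: simpler
-- what changed: Replaces the reversed-iteration shift-accumulator (shift left, OR in bits one at a time, final right shift) with a single forward enumerate loop that ORs a fixed 2-bit code per cell directly into its position.
import Mathlib
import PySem

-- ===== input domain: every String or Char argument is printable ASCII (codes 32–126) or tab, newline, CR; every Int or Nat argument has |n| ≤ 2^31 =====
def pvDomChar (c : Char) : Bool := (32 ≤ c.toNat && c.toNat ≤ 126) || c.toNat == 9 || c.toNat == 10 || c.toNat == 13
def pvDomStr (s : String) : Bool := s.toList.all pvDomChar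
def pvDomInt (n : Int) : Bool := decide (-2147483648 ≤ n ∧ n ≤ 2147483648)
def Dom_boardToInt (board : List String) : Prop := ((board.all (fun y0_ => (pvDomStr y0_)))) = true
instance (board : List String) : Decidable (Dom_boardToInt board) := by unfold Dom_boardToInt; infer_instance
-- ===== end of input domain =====

-- B replaces A's reversed-order shift/OR accumulator with a forward enumerate loop that ORs a
-- 2-bit code for each cell directly into its position (objective: simpler).

-- ===== PORT A =====
-- one iteration of A's backwards loop body
def pvAStep (n : Int) (p : String) : Int :=
  if p = "" then
    n <<< (2:Nat)
  else
    let n := PySem.Int.bor n 1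
    let n := n <<< (1:Nat)
    let n := if p = "X" then PySem.Int.bor n 1 else n
    n <<< (1:Nat)

def boardToInt (board : List String) : Int :=
  -- board[::-1]
  let rev := (PySem.List.slice? board none none (-1)).getD []
  let n := rev.foldl pvAStep 0
  n >>> (1:Nat)

-- ===== PORT B =====
-- one iteration of B's forward loop body (i, p = enumerate element)
def pvBStep (n : Int) (ip : Int × String) : Int :=
  if ip.2 = "" then n
  else PySem.Int.bor n ((if ip.2 = "X" then (3:Int) else 2) <<< (2 * ip.1).toNat)

def boardToInt_alt (board : List String) : Int :=
  (PySem.List.enumerate board).foldl pvBStep 0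

-- ===== PRECONDITION & SPEC =====
def Spec_boardToInt (board : List String) (out : Int) : Prop := out = boardToInt_alt board
instance (board : List String) (out : Int) : Decidable (Spec_boardToInt board out) := by unfold Spec_boardToInt; infer_instance

-- ===== CLAIM (what is proved, stated in full; the proofs are below) =====
def Claim_equal_boardToInt : Prop := ∀ (board : List String), Dom_boardToInt board → Spec_boardToInt board (boardToInt board)

-- ===== LEMMAS AND PROOFS =====

-- the common reference value: per-cell 2-bit code, little-endian base-4
def pvCode (p : String) : Int := if p = "" then 0 else if p = "X" then 3 else 2

def pvR : List String → Int
  | [] => 0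
  | p :: l => pvCode p + 4 * pvR l

theorem pvCode_nonneg (p : String) : 0 ≤ pvCode p := by
  unfold pvCode; split_ifs <;> norm_num

theorem pvR_nonneg (l : List String) : 0 ≤ pvR l := by
  induction l with
  | nil => simp [pvR]
  | cons p l ih => have := pvCode_nonneg p; simp only [pvR]; linarith

-- Nat bit lemmas
theorem pv_nat_even_lor_one (n : Nat) (h : n % 2 = 0) : n ||| 1 = n + 1 := by
  have h2 := Nat.lor_bit false (n / 2) true 0
  simp [Nat.bit] at h2
  have hn : 2 * (n / 2) = n := by omega
  rw [hn] at h2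
  omega

theorem pv_nat_lor_mul_pow (k : Nat) : ∀ a b : Nat, a < 2 ^ k → a ||| (b * 2 ^ k) = a + b * 2 ^ k := by
  induction k with
  | zero =>
    intro a b h
    have : a = 0 := by omega
    subst this; simp
  | succ k ih =>
    intro a b h
    have hb := Nat.lor_bit (a.testBit 0) (a >>> 1) false (b * 2 ^ k)
    rw [Nat.bit_testBit_zero_shiftRight_one] at hb
    have hs : a >>> 1 = a / 2 := Nat.shiftRight_one a
    have hlt : a >>> 1 < 2 ^ k := by rw [hs]; rw [pow_succ] at h; omega
    rw [ih (a >>> 1) b hlt] at hb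
    have hbf : Nat.bit false (b * 2 ^ k) = b * 2 ^ (k + 1) := by
      simp [Nat.bit, pow_succ]; ring
    rw [hbf] at hb
    rw [hb, hs]
    have h2 : b * 2 ^ (k + 1) = 2 * (b * 2 ^ k) := by ring
    rw [h2]
    have h3 : a < 2 * 2 ^ k := by rw [pow_succ] at h; omega
    generalize b * 2 ^ k = y
    cases ht : a.testBit 0 with
    | false =>
      have h0 : a % 2 = 0 := by
        have := Nat.testBit_zero a; rw [ht] at this; simpa using this.symm
      simp only [Nat.bit, Bool.or_false, cond_false]
      omega
    | true =>
      have h0 : a % 2 = 1 := by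
        have := Nat.testBit_zero a; rw [ht] at this; simpa using this.symm
      simp only [Nat.bit, Bool.or_false, cond_true]
      omega

-- Int versions
theorem pv_int_even_bor_one (a : Int) (h0 : 0 ≤ a) (h2 : a % 2 = 0) :
    PySem.Int.bor a 1 = a + 1 := by
  obtain ⟨n, rfl⟩ := Int.eq_ofNat_of_zero_le h0
  have hn : (n : Nat) % 2 = 0 := by omega
  rw [show (1 : Int) = ((1 : Nat) : Int) from rfl, PySem.Int.bor_natCast,
    pv_nat_even_lor_one n hn]
  push_cast; ring

theorem pv_int_bor_mul_pow (k : Nat) (a b : Int) (h0 : 0 ≤ a) (ha : a < 2 ^ k)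
    (hb0 : 0 ≤ b) : PySem.Int.bor a (b * 2 ^ k) = a + b * 2 ^ k := by
  obtain ⟨m, rfl⟩ := Int.eq_ofNat_of_zero_le h0
  obtain ⟨n, rfl⟩ := Int.eq_ofNat_of_zero_le hb0
  have hm : m < 2 ^ k := by exact_mod_cast ha
  have : ((n : Int)) * 2 ^ k = ((n * 2 ^ k : Nat) : Int) := by push_cast; ring
  rw [this, PySem.Int.bor_natCast, pv_nat_lor_mul_pow k m n hm]
  push_cast; ring

-- A's loop computes 2 * pvR
theorem pv_aloop (l : List String) : l.reverse.foldl pvAStep 0 = 2 * pvR l := by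
  induction l with
  | nil => simp [pvR]
  | cons p l ih =>
    have hR0 := pvR_nonneg l
    rw [List.reverse_cons, List.foldl_append, ih]
    simp only [List.foldl_cons, List.foldl_nil]
    unfold pvAStep
    by_cases hp : p = ""
    · simp [hp, pvR, pvCode, Int.shiftLeft_eq]; ring
    · simp only [hp, if_false]
      have e1 : PySem.Int.bor (2 * pvR l) 1 = 2 * pvR l + 1 :=
        pv_int_even_bor_one (2 * pvR l) (by linarith) (by omega)
      rw [e1]
      by_cases hx : p = "X"
      · have e2 : (2 * pvR l + 1) <<< (1:Nat) = 4 * pvR l + 2 := by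
          rw [Int.shiftLeft_eq]; ring
        rw [e2]
        simp only [hx, if_true]
        have e3 : PySem.Int.bor (4 * pvR l + 2) 1 = 4 * pvR l + 2 + 1 :=
          pv_int_even_bor_one (4 * pvR l + 2) (by linarith) (by omega)
        rw [e3, Int.shiftLeft_eq]
        subst hx
        simp [pvR, pvCode]; ring
      · simp only [hx, if_false]
        rw [Int.shiftLeft_eq, Int.shiftLeft_eq]
        simp [pvR, pvCode, hp, if_neg hx]; ring

-- B's loop invariant
theorem pv_bloop (l : List String) : ∀ (k : Nat) (n : Int), 0 ≤ n → n < 4 ^ k →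
    (PySem.List.enumerate l (k : Int)).foldl pvBStep n = n + 4 ^ k * pvR l := by
  induction l with
  | nil => intro k n _ _; simp [PySem.List.enumerate, pvR]
  | cons p l ih =>
    intro k n hn0 hnk
    rw [PySem.List.enumerate_cons, List.foldl_cons]
    have hstep : ((k : Int) + 1) = ((k + 1 : Nat) : Int) := by push_cast; ring
    by_cases hp : p = ""
    · have hb : pvBStep n ((k : Int), p) = n := by simp [pvBStep, hp]
      rw [hb, hstep, ih (k + 1) n hn0 (by
        have : (4:Int) ^ k ≤ 4 ^ (k + 1) := by
          apply pow_le_pow_right₀ <;> norm_num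
        linarith)]
      simp [pvR, pvCode, hp, pow_succ]; ring
    · set c : Int := if p = "X" then (3:Int) else 2 with hc
      have hc0 : 0 ≤ c := by rw [hc]; split_ifs <;> norm_num
      have hc3 : c ≤ 3 := by rw [hc]; split_ifs <;> norm_num
      have htn : (2 * (k : Int)).toNat = 2 * k := by omega
      have hpow : ((2:Int)) ^ (2 * k) = 4 ^ k := by
        rw [pow_mul]; norm_num
      have hb : pvBStep n ((k : Int), p) = n + c * 4 ^ k := by
        simp only [pvBStep, hp, if_false]
        rw [htn, Int.shiftLeft_eq, ← hc]
        rw [pv_int_bor_mul_pow (2 * k) n c hn0 (by rw [hpow]; exact hnk) hc0, hpow]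
      rw [hb, hstep]
      have h4 : (0:Int) < 4 ^ k := by positivity
      rw [ih (k + 1) (n + c * 4 ^ k) (by positivity) (by
        rw [pow_succ]; nlinarith)]
      simp only [pvR, pow_succ]
      have : pvCode p = c := by simp [pvCode, hp, hc]
      rw [this]; ring

theorem pv_a_eq (board : List String) : boardToInt board = pvR board := by
  unfold boardToInt
  rw [PySem.List.slice?_none_none_neg_one]
  simp only [Option.getD_some]
  rw [pv_aloop]
  have h0 := pvR_nonneg board
  rw [Int.shiftRight_eq_div_pow]
  omega

theorem pv_b_eq (board : List String) : boardToInt_alt board = pvR board := by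
  unfold boardToInt_alt
  have := pv_bloop board 0 0 (by norm_num) (by norm_num)
  simpa using this

-- ===== VERDICT (by name: the statement is the Claim_ definition above) =====
theorem boardToInt_spec : Claim_equal_boardToInt := by
  intro board _
  unfold Spec_boardToInt
  rw [pv_a_eq, pv_b_eq]
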